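-- pv_equiv track=rewrite | github.com/Sagyam/HESV-API | server/majorProject/helper/poly_solver.py | add_leading_ones
-- ===== SOURCE A (Python) =====
-- def add_leading_ones(eqn):
--     '''
--     This function takes add leading 1 to x
--     Input: +x^3+x^2+x
--     Output: +1x^3+1x^2+1x
--     '''
--     position_table = {}
--     count = 0
--
--     for i, char in enumerate(eqn):
--         if char in ['x', 'X'] and eqn[i-1] in ['+', '-']:
--             count += 1
--             position_table[count] = i
--
--     for key, value in position_table.items():
--         eqn = eqn[:value+key-1] + '1' + eqn[value+key-1:]
--
--     return eqn
-- ===== SOURCE B (Python) =====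
-- def add_leading_ones(eqn):
--     '''
--     This function takes add leading 1 to x
--     Input: +x^3+x^2+x
--     Output: +1x^3+1x^2+1x
--     '''
--     out = []
--     for i, char in enumerate(eqn):
--         if char in ['x', 'X'] and eqn[i - 1] in ['+', '-']:
--             out.append('1')
--         out.append(char)
--     return ''.join(out)
-- ===== Notes on version B (the rewrite author's own statement) =====
-- stated objective: simpler
-- what changed: Replaces A's two-phase scheme (build a count->position dict, then repeatedly re-slice and rebuild the string once per match with a shifting offset) by a single forward pass that appends to a result list ('1' before each matched x, checking eqn[i-1] against the original string so the i==0 wrap-around is kept) and joins once.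
import Mathlib
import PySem

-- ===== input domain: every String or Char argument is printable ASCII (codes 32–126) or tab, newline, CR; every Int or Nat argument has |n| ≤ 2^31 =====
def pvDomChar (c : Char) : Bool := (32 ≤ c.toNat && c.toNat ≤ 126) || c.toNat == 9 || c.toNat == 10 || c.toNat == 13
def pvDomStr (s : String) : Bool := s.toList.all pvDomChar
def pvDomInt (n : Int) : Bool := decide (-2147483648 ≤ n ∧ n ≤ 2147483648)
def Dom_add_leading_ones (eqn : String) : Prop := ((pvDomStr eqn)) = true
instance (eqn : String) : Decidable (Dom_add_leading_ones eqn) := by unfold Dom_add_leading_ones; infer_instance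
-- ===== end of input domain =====

-- B does one forward pass appending to a result list instead of A's dict of positions plus
-- repeated slicing; same return value on every input (the i==0 check of eqn[-1] is kept).

-- the condition `char in ['x','X'] and eqn[i-1] in ['+','-']`, identical in both sources
-- (checked against the ORIGINAL string in both: A mutates eqn only after its scan ends)
def pvCond (eqn : String) (ic : Int × Char) : Bool :=
  (ic.2 == 'x' || ic.2 == 'X') &&
  (match PySem.Str.pyGet? eqn (ic.1 - 1) with
   | some p => p == '+' || p == '-'
   | none => false)

-- ===== PORT A =====
def add_leading_ones (eqn : String) : String :=
  let st := (PySem.List.enumerate eqn.toList 0).foldl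
    (fun (st : PySem.Dict Int Int × Int) ic =>
      if pvCond eqn ic then (st.1.insert (st.2 + 1) ic.1, st.2 + 1) else st)
    (PySem.Dict.empty, 0)
  String.ofList (st.1.items.foldl
    (fun cur kv =>
      PySem.List.slice cur none (some (kv.2 + kv.1 - 1)) ++
        '1' :: PySem.List.slice cur (some (kv.2 + kv.1 - 1)) none)
    eqn.toList)

-- ===== PORT B =====
def add_leading_ones_alt (eqn : String) : String :=
  String.ofList ((PySem.List.enumerate eqn.toList 0).foldl
    (fun acc ic =>
      let acc := if pvCond eqn ic then acc ++ ['1'] else acc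
      acc ++ [ic.2])
    [])

-- ===== PRECONDITION & SPEC =====
def Spec_add_leading_ones (eqn : String) (out : String) : Prop := out = add_leading_ones_alt eqn
instance (eqn : String) (out : String) : Decidable (Spec_add_leading_ones eqn out) := by unfold Spec_add_leading_ones; infer_instance

-- ===== CLAIM (what is proved, stated in full; the proofs are below) =====
def Claim_equal_add_leading_ones : Prop := ∀ (eqn : String), Dom_add_leading_ones eqn → Spec_add_leading_ones eqn (add_leading_ones eqn)

-- ===== LEMMAS AND PROOFS =====

-- absolute positions (start i) at which f fires
def pvPos (f : Int × Char → Bool) : List Char → Int → List Int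
  | [], _ => []
  | c :: t, i => (if f (i, c) then [i] else []) ++ pvPos f t (i + 1)

-- the single-pass result (what B computes)
def pvExpand (f : Int × Char → Bool) : List Char → Int → List Char
  | [], _ => []
  | c :: t, i => (if f (i, c) then ['1', c] else [c]) ++ pvExpand f t (i + 1)

-- one insertion of '1' at (clamped) index m
def pvIns (s : List Char) (m : Int) : List Char :=
  PySem.List.slice s none (some m) ++ '1' :: PySem.List.slice s (some m) none

-- A's second loop: insert at p + j for positions p with running shift j
def pvInsAll : List Char → List Int → Int → List Char
  | s, [], _ => s
  | s, p :: ps, j => pvInsAll (pvIns s (p + j)) ps (j + 1)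

-- A's dict items: (count+1, i) pairs over the matched enumerate entries
def pvNumbered : List (Int × Char) → Int → List (Int × Int)
  | [], _ => []
  | p :: ps, c => (c + 1, p.1) :: pvNumbered ps (c + 1)

theorem pvPos_ge (f : Int × Char → Bool) (l : List Char) (i : Int) :
    ∀ p ∈ pvPos f l i, i ≤ p := by
  induction l generalizing i with
  | nil => simp [pvPos]
  | cons c t ih =>
    intro p hp
    simp only [pvPos, List.mem_append] at hp
    rcases hp with hp | hp
    · split at hp <;> simp_all
    · have := ih (i + 1) p hp; omega

theorem pvIns_cons (c : Char) (s : List Char) (m : Int) (hm : 0 ≤ m) :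
    pvIns (c :: s) (m + 1) = c :: pvIns s m := by
  have h1 : (m + 1).toNat = m.toNat + 1 := by omega
  rw [pvIns, pvIns, PySem.List.slice_to (c :: s) (by omega : (0:Int) ≤ m + 1),
    PySem.List.slice_from (c :: s) (by omega : (0:Int) ≤ m + 1),
    PySem.List.slice_to s hm, PySem.List.slice_from s hm, h1]
  simp

theorem pvInsAll_cons (c : Char) (ps : List Int) :
    ∀ (s : List Char) (j : Int), 0 ≤ j → (∀ p ∈ ps, 0 ≤ p) →
    pvInsAll (c :: s) ps (j + 1) = c :: pvInsAll s ps j := by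
  induction ps with
  | nil => intro s j _ _; rfl
  | cons p rest ih =>
    intro s j hj hps
    have hp : 0 ≤ p := hps p (by simp)
    have harith : p + (j + 1) = (p + j) + 1 := by ring
    simp only [pvInsAll, harith, pvIns_cons c s (p + j) (by omega)]
    exact ih (pvIns s (p + j)) (j + 1) (by omega) (fun q hq => hps q (by simp [hq]))

theorem pvInsAll_map_add_one (ps : List Int) :
    ∀ (s : List Char) (j : Int), pvInsAll s (ps.map (· + 1)) j = pvInsAll s ps (j + 1) := by
  induction ps with
  | nil => intro s j; rfl
  | cons p rest ih =>
    intro s j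
    have harith : p + 1 + j = p + (j + 1) := by ring
    simp only [List.map_cons, pvInsAll, harith]
    exact ih _ (j + 1)

theorem pvPos_shift (f : Int × Char → Bool) (t : List Char) :
    ∀ i : Int, pvPos f t (i + 1) = (pvPos (fun ic => f (ic.1 + 1, ic.2)) t i).map (· + 1) := by
  induction t with
  | nil => intro i; rfl
  | cons c r ih =>
    intro i
    simp only [pvPos, List.map_append, ih (i + 1)]
    congr 1
    split <;> simp

theorem pvExpand_shift (f : Int × Char → Bool) (t : List Char) :
    ∀ i : Int, pvExpand f t (i + 1) = pvExpand (fun ic => f (ic.1 + 1, ic.2)) t i := by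
  induction t with
  | nil => intro i; rfl
  | cons c r ih => intro i; simp only [pvExpand, ih (i + 1)]

theorem pvIns_zero (s : List Char) : pvIns s 0 = '1' :: s := by
  rw [pvIns, PySem.List.slice_to s (le_refl (0:Int)), PySem.List.slice_from s (le_refl (0:Int))]
  simp

theorem pvInsAll_cons1 (c : Char) (s : List Char) (ps : List Int) (h : ∀ p ∈ ps, 0 ≤ p) :
    pvInsAll (c :: s) ps 1 = c :: pvInsAll s ps 0 := by
  have := pvInsAll_cons c ps s 0 le_rfl h
  norm_num at this
  exact this

theorem pvInsAll_cons2 (c : Char) (s : List Char) (ps : List Int) (h : ∀ p ∈ ps, 0 ≤ p) :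
    pvInsAll (c :: s) ps 2 = c :: pvInsAll s ps 1 := by
  have := pvInsAll_cons c ps s 1 (by omega) h
  norm_num at this
  exact this

-- the core: A's sequential insertions at the recorded positions equal B's single pass
theorem pvMain (l : List Char) : ∀ f : Int × Char → Bool,
    pvInsAll l (pvPos f l 0) 0 = pvExpand f l 0 := by
  induction l with
  | nil => intro f; rfl
  | cons c t ih =>
    intro f
    have hnn : ∀ p ∈ pvPos (fun ic => f (ic.1 + 1, ic.2)) t 0, 0 ≤ p :=
      pvPos_ge _ t 0
    have hshift := pvPos_shift f t 0
    have heshift := pvExpand_shift f t 0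
    have hshift' : pvPos f t 1 = (pvPos (fun ic => f (ic.1 + 1, ic.2)) t 0).map (· + 1) := by
      simpa using hshift
    have heshift' : pvExpand f t 1 = pvExpand (fun ic => f (ic.1 + 1, ic.2)) t 0 := by
      simpa using heshift
    by_cases h : f (0, c) = true
    · simp only [pvPos, pvExpand, h, if_pos, List.singleton_append, pvInsAll,
        zero_add, pvIns_zero]
      rw [hshift', pvInsAll_map_add_one, show (1:Int) + 1 = 2 by norm_num,
        pvInsAll_cons2 '1' (c :: t) _ hnn, pvInsAll_cons1 c t _ hnn, ih, heshift']
      rfl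
    · simp only [pvPos, pvExpand, h, if_neg, Bool.not_eq_true, List.nil_append, zero_add]
      rw [hshift', pvInsAll_map_add_one, show (0:Int) + 1 = 1 by norm_num,
        pvInsAll_cons1 c t _ hnn, ih, heshift']
      rfl

-- A's first loop, characterized
theorem pvFoldA (f : Int × Char → Bool) (L : List (Int × Char)) :
    ∀ (d : PySem.Dict Int Int) (c : Int), (∀ k ∈ d.keys, k ≤ c) →
    L.foldl (fun (st : PySem.Dict Int Int × Int) ic =>
        if f ic then (st.1.insert (st.2 + 1) ic.1, st.2 + 1) else st) (d, c)
      = (PySem.Dict.mk (d.items ++ pvNumbered (L.filter f) c),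
         c + (L.filter f).length) := by
  induction L with
  | nil =>
    intro d c _
    simp [pvNumbered]
  | cons p rest ih =>
    intro d c hd
    by_cases hf : f p = true
    · have hnc : d.contains (c + 1) = false := by
        by_contra h
        have : d.contains (c + 1) = true := by simpa using h
        have hm := (PySem.Dict.contains_iff_mem_keys d (c + 1)).1 this
        have := hd _ hm; omega
      have hitems := PySem.Dict.items_insert_of_not_contains (d := d) (k := c + 1)
        (v := p.1) hnc
      have hkeys : ∀ k ∈ (d.insert (c + 1) p.1).keys, k ≤ c + 1 := by
        intro k hk
        rcases (PySem.Dict.mem_keys_insert d (c + 1) k p.1).1 hk with h | h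
        · omega
        · have := hd k h; omega
      simp only [List.foldl_cons, hf, if_pos, List.filter_cons_of_pos hf]
      rw [ih (d.insert (c + 1) p.1) (c + 1) hkeys]
      simp only [Prod.mk.injEq, PySem.Dict.ext_iff]
      constructor
      · show (d.insert (c + 1) p.1).items ++ _ = _
        rw [hitems]
        simp [pvNumbered]
      · simp only [List.length_cons]
        push_cast
        omega
    · have hf' : f p = false := by simpa using hf
      simp only [List.foldl_cons, Bool.false_eq_true, if_false, List.filter_cons, hf']
      exact ih d c hd
  
-- A's second loop over the numbered items is pvInsAll on the positions
theorem pvFoldA2 (M : List (Int × Char)) :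
    ∀ (s : List Char) (c : Int),
    (pvNumbered M c).foldl (fun cur kv =>
        PySem.List.slice cur none (some (kv.2 + kv.1 - 1)) ++
          '1' :: PySem.List.slice cur (some (kv.2 + kv.1 - 1)) none) s
      = pvInsAll s (M.map (·.1)) c := by
  induction M with
  | nil => intro s c; rfl
  | cons p rest ih =>
    intro s c
    have harith : p.1 + (c + 1) - 1 = p.1 + c := by ring
    simp only [pvNumbered, List.foldl_cons, List.map_cons, pvInsAll, harith]
    exact ih _ (c + 1)

-- B's loop is pvExpand
theorem pvFoldB (f : Int × Char → Bool) (l : List Char) :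
    ∀ (i : Int) (acc : List Char),
    (PySem.List.enumerate l i).foldl (fun acc ic =>
        let acc := if f ic then acc ++ ['1'] else acc
        acc ++ [ic.2]) acc
      = acc ++ pvExpand f l i := by
  induction l with
  | nil => intro i acc; simp [PySem.List.enumerate_nil, pvExpand]
  | cons c t ih =>
    intro i acc
    rw [PySem.List.enumerate_cons, List.foldl_cons, ih (i + 1)]
    simp only [pvExpand]
    split <;> simp

-- matched positions of the enumerate-filter are pvPos
theorem pvFilterPos (f : Int × Char → Bool) (l : List Char) :
    ∀ i : Int, ((PySem.List.enumerate l i).filter f).map (·.1) = pvPos f l i := by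
  induction l with
  | nil => intro i; rfl
  | cons c t ih =>
    intro i
    rw [PySem.List.enumerate_cons]
    by_cases h : f (i, c) = true
    · simp [List.filter_cons_of_pos h, pvPos, h, ih (i + 1)]
    · have h' : f (i, c) = false := by simpa using h
      simp [h', pvPos, ih (i + 1)]

-- ===== VERDICT (by name: the statement is the Claim_ definition above) =====
theorem add_leading_ones_spec : Claim_equal_add_leading_ones := by
  intro eqn _
  show add_leading_ones eqn = add_leading_ones_alt eqn
  unfold add_leading_ones add_leading_ones_alt
  rw [pvFoldA (pvCond eqn) (PySem.List.enumerate eqn.toList 0) PySem.Dict.empty 0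
      (by simp [PySem.Dict.keys_empty])]
  show String.ofList
      (List.foldl
        (fun cur kv =>
          PySem.List.slice cur none (some (kv.2 + kv.1 - 1)) ++
            '1' :: PySem.List.slice cur (some (kv.2 + kv.1 - 1)) none)
        eqn.toList
        ((PySem.Dict.empty : PySem.Dict Int Int).items ++
          pvNumbered (List.filter (pvCond eqn) (PySem.List.enumerate eqn.toList 0)) 0)) =
    String.ofList
      (List.foldl
        (fun acc ic =>
          let acc := if pvCond eqn ic then acc ++ ['1'] else acc
          acc ++ [ic.2])
        [] (PySem.List.enumerate eqn.toList 0))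
  rw [show (PySem.Dict.empty : PySem.Dict Int Int).items = [] from rfl, List.nil_append,
    pvFoldA2, pvFilterPos, pvMain, pvFoldB]
  simp
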